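-- pv_equiv track=rewrite | github.com/NoemiRodrigues/Lema-do-Bombeamento | código.py | pertence_linguagem
-- ===== SOURCE A (Python) =====
-- def pertence_linguagem(w):
--     n_a = 0  # Contador de 'a'
--     n_b = 0  # Contador de 'b'
--     fase_b = False  # Indica se já começou a ler 'b'
--
--     for c in w:
--         if c == 'a' and not fase_b:
--             n_a += 1  # adiciona 1 à 'a'
--         elif c == 'b':
--             fase_b = True  # adiciona 1 à 'b'
--             n_b += 1
--         else:
--             return False  # caso qualquer outro simbolo, falso
--
--
--     return n_a == n_b and n_a > 0
-- ===== SOURCE B (Python) =====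
-- def pertence_linguagem(w):
--     n = len(w)
--     if n == 0 or n % 2 == 1:
--         return False
--     h = n // 2
--     return w == 'a' * h + 'b' * h
-- ===== Notes on version B (the rewrite author's own statement) =====
-- stated objective: simpler
-- what changed: Replaces the character-by-character counting loop with a phase flag by constructing the canonical string a^h b^h (h = len(w)//2) and doing a single equality comparison.
import Mathlib
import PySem

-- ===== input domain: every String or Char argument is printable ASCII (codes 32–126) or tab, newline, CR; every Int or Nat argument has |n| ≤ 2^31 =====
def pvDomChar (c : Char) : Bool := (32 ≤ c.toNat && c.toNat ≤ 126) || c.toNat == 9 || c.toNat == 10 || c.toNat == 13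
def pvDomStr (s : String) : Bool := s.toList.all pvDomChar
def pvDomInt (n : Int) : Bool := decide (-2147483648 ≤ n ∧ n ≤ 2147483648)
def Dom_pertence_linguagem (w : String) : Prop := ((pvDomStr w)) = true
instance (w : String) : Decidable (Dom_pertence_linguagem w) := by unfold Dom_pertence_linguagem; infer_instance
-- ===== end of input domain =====

-- B replaces A's counting loop with a single comparison against the canonical string a^h b^h (objective: simpler).

-- ===== PORT A =====
-- the for-loop with early return: state (n_a, n_b, fase_b)
def pvALoop : List Char → Int → Int → Bool → Bool
  | [], n_a, n_b, _ => n_a == n_b && n_a > 0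
  | c :: cs, n_a, n_b, fase_b =>
    if c = 'a' ∧ fase_b = false then pvALoop cs (n_a + 1) n_b fase_b
    else if c = 'b' then pvALoop cs n_a (n_b + 1) true
    else false

def pertence_linguagem (w : String) : Bool := pvALoop w.toList 0 0 false

-- ===== PORT B =====
def pertence_linguagem_alt (w : String) : Bool :=
  let n := w.toList.length
  if n = 0 ∨ n % 2 = 1 then false
  else w.toList = List.replicate (n / 2) 'a' ++ List.replicate (n / 2) 'b'

-- ===== PRECONDITION & SPEC =====
def Spec_pertence_linguagem (w : String) (out : Bool) : Prop := out = pertence_linguagem_alt w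
instance (w : String) (out : Bool) : Decidable (Spec_pertence_linguagem w out) := by unfold Spec_pertence_linguagem; infer_instance

-- ===== CLAIM (what is proved, stated in full; the proofs are below) =====
def Claim_equal_pertence_linguagem : Prop := ∀ (w : String), Dom_pertence_linguagem w → Spec_pertence_linguagem w (pertence_linguagem w)

-- ===== LEMMAS AND PROOFS =====

theorem pvALoop_iff (cs : List Char) : ∀ (n_a n_b : Int) (f : Bool),
    pvALoop cs n_a n_b f = true ↔
      ∃ i j : ℕ, cs = List.replicate i 'a' ++ List.replicate j 'b' ∧
        (f = true → i = 0) ∧ n_a + i = n_b + j ∧ n_a + i > 0 := by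
  induction cs with
  | nil =>
    intro n_a n_b f
    simp only [pvALoop, Bool.and_eq_true, beq_iff_eq, decide_eq_true_eq]
    constructor
    · rintro ⟨h1, h2⟩
      exact ⟨0, 0, by simp, by simp, by omega, by omega⟩
    · rintro ⟨i, j, hcs, _, h1, h2⟩
      have hi : i = 0 ∧ j = 0 := by
        constructor <;> [skip; skip] <;>
          · by_contra h
            have : (List.replicate i 'a' ++ List.replicate j 'b').length = 0 := by
              rw [← hcs]; simp
            simp at this; omega
      obtain ⟨hi, hj⟩ := hi
      subst hi; subst hj
      simp at h1 h2
      exact ⟨by omega, by omega⟩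
  | cons c cs ih =>
    intro n_a n_b f
    simp only [pvALoop]
    by_cases hca : c = 'a' ∧ f = false
    · obtain ⟨hc, hf⟩ := hca
      subst hc; subst hf
      rw [if_pos ⟨rfl, rfl⟩, ih]
      constructor
      · rintro ⟨i, j, hcs, _, h1, h2⟩
        refine ⟨i + 1, j, ?_, by simp, by push_cast; omega, by push_cast; omega⟩
        simp [List.replicate_succ, hcs]
      · rintro ⟨i, j, hcs, _, h1, h2⟩
        cases i with
        | zero =>
          exfalso
          cases j with
          | zero => simp at hcs
          | succ j' => simp [List.replicate_succ] at hcs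
        | succ i' =>
          simp [List.replicate_succ] at hcs
          refine ⟨i', j, hcs, by simp, by push_cast at h1 ⊢; omega, by push_cast at h2 ⊢; omega⟩
    · rw [if_neg hca]
      by_cases hcb : c = 'b'
      · subst hcb
        rw [if_pos rfl, ih]
        constructor
        · rintro ⟨i, j, hcs, hf0, h1, h2⟩
          have hi0 : i = 0 := hf0 rfl
          subst hi0
          refine ⟨0, j + 1, ?_, by simp, by push_cast; omega, by push_cast at h2 ⊢; omega⟩
          simp [List.replicate_succ] at hcs ⊢
          exact hcs
        · rintro ⟨i, j, hcs, hf0, h1, h2⟩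
          have hi0 : i = 0 := by
            cases i with
            | zero => rfl
            | succ i' => simp [List.replicate_succ] at hcs
          subst hi0
          cases j with
          | zero => simp at hcs
          | succ j' =>
            simp [List.replicate_succ] at hcs
            refine ⟨0, j', hcs, by simp, by push_cast at h1 ⊢; omega, by push_cast at h2 ⊢; omega⟩
      · rw [if_neg hcb]
        simp only [Bool.false_eq_true, false_iff]
        rintro ⟨i, j, hcs, hf0, _, _⟩
        cases i with
        | zero =>
          cases j with
          | zero => simp at hcs
          | succ j' => simp [List.replicate_succ] at hcs; exact hcb hcs.1
        | succ i' =>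
          simp [List.replicate_succ] at hcs
          cases hf : f with
          | false => exact hca ⟨hcs.1, hf⟩
          | true => exact absurd (hf0 hf) (by simp)

theorem pertence_linguagem_alt_iff (w : String) :
    pertence_linguagem_alt w = true ↔
      ∃ h : ℕ, h > 0 ∧ w.toList = List.replicate h 'a' ++ List.replicate h 'b' := by
  unfold pertence_linguagem_alt
  by_cases hc : w.toList.length = 0 ∨ w.toList.length % 2 = 1
  · simp only [hc, if_true, Bool.false_eq_true, false_iff]
    rintro ⟨h, hpos, heq⟩
    have : w.toList.length = 2 * h := by rw [heq]; simp; omega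
    omega
  · simp only [hc, if_false, decide_eq_true_eq]
    constructor
    · intro heq
      exact ⟨w.toList.length / 2, by omega, heq⟩
    · rintro ⟨h, hpos, heq⟩
      have hlen : w.toList.length = 2 * h := by rw [heq]; simp; omega
      have hl2 : w.toList.length / 2 = h := by omega
      rw [hl2, heq]

-- ===== VERDICT (by name: the statement is the Claim_ definition above) =====
theorem pertence_linguagem_spec : Claim_equal_pertence_linguagem := by
  intro w _
  unfold Spec_pertence_linguagem pertence_linguagem
  have hA := pvALoop_iff w.toList 0 0 false
  have hB := pertence_linguagem_alt_iff w
  have hiff : pvALoop w.toList 0 0 false = true ↔ pertence_linguagem_alt w = true := by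
    rw [hA, hB]
    constructor
    · rintro ⟨i, j, hcs, _, h1, h2⟩
      have hij : i = j := by omega
      exact ⟨i, by omega, by rw [hcs, hij]⟩
    · rintro ⟨h, hpos, heq⟩
      exact ⟨h, h, heq, by simp, rfl, by omega⟩
  cases ha : pvALoop w.toList 0 0 false <;> cases hb : pertence_linguagem_alt w <;> simp_all
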